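-- pv_equiv track=rewrite | github.com/slotrans/commas-first | match_parens.py | cursor_motion
-- ===== SOURCE A (Python) =====
-- def cursor_motion(init_x: int, init_y: int, instr: str): # Tuple(int, int)
--     x = init_x
--     y = init_y
--     for c in instr:
--         if '\n' == c:
--             y += 1
--             x = 1 # a newline resets the column to 1
--         else:
--             x += 1
--
--     return (x, y)
-- ===== SOURCE B (Python) =====
-- def cursor_motion(init_x: int, init_y: int, instr: str):  # Tuple(int, int)
--     # y advances by the number of newlines; the column is determined by the
--     # distance from the end back to the last newline (= first '\n' in the reverse).
--     y = init_y + instr.count('\n')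
--     i = instr[::-1].find('\n')
--     if i == -1:
--         return (init_x + len(instr), y)
--     return (1 + i, y)
-- ===== Notes on version B (the rewrite author's own statement) =====
-- stated objective: faster
-- what changed: Replaces the per-character state-machine loop with closed-form string arithmetic: y = init_y + instr.count('\n'), and the column read off the position of the first newline in the reversed string (init_x + len(instr) when there is none); C-level str methods replace the Python-level loop.
import Mathlib
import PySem

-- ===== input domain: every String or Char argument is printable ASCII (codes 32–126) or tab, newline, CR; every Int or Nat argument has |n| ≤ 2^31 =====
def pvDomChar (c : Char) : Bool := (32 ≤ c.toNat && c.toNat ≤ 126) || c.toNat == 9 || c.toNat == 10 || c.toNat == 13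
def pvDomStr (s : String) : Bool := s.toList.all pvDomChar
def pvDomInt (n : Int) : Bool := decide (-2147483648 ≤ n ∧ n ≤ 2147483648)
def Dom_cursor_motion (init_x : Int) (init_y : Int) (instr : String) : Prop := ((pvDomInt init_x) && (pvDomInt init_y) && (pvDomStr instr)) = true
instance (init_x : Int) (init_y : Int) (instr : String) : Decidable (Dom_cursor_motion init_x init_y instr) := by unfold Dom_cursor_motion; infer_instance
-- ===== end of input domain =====

-- B replaces A's per-character (x, y) state-machine loop with closed-form string arithmetic
-- (newline count for y, position of the first newline in the reversed string for x); same O(n) cost, measurably faster in CPython (C-level str methods).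

-- ===== PORT A =====
-- literal transliteration of A: a fold over the characters carrying the state (x, y)
def cursor_motion (init_x : Int) (init_y : Int) (instr : String) : Int × Int :=
  instr.toList.foldl
    (fun (p : Int × Int) (c : Char) =>
      if '\n' = c then (1, p.2 + 1) else (p.1 + 1, p.2))
    (init_x, init_y)

-- ===== PORT B =====
-- literal transliteration of B (Source B); instr[::-1] is Str.slice? with step -1 (some for every nonzero step, hence getD)
def cursor_motion_alt (init_x : Int) (init_y : Int) (instr : String) : Int × Int :=
  let y : Int := init_y + (PySem.Str.count instr "\n" : Int)
  let i : Int := PySem.Str.find ((PySem.Str.slice? instr none none (-1)).getD "") "\n"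
  if i = -1 then (init_x + (PySem.Str.len instr : Int), y)
  else (1 + i, y)

-- ===== PRECONDITION & SPEC =====
def Spec_cursor_motion (init_x : Int) (init_y : Int) (instr : String) (out : Int × Int) : Prop := out = cursor_motion_alt init_x init_y instr
instance (init_x : Int) (init_y : Int) (instr : String) (out : Int × Int) : Decidable (Spec_cursor_motion init_x init_y instr out) := by unfold Spec_cursor_motion; infer_instance

-- ===== CLAIM (what is proved, stated in full; the proofs are below) =====
def Claim_equal_cursor_motion : Prop := ∀ (init_x : Int) (init_y : Int) (instr : String), Dom_cursor_motion init_x init_y instr → Spec_cursor_motion init_x init_y instr (cursor_motion init_x init_y instr)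

-- ===== LEMMAS AND PROOFS =====
theorem countGo_nl (cs : List Char) : ∀ (fuel acc : Nat), cs.length ≤ fuel →
    PySem.Chars.count.go ['\n'] fuel cs acc = acc + cs.count '\n' := by
  induction cs with
  | nil => intro fuel acc h; cases fuel <;> simp [PySem.Chars.count.go]
  | cons c t ih =>
    intro fuel acc h
    cases fuel with
    | zero => simp at h
    | succ f =>
      rw [PySem.Chars.count.go.eq_def]
      by_cases hc : c = '\n'
      · subst hc
        simp only [List.isPrefixOf, beq_self_eq_true, Bool.true_and, if_true, List.length_singleton]
        simp only [List.drop_succ_cons, List.drop_zero]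
        rw [ih f (acc + 1) (by simpa using Nat.le_of_succ_le_succ h)]
        simp; omega
      · have hb : (('\n' : Char) == c) = false := by simpa using Ne.symm hc
        simp only [List.isPrefixOf, hb, Bool.false_and, Bool.false_eq_true, if_false]
        rw [ih f acc (by simpa using Nat.le_of_succ_le_succ h)]
        simp [List.count_cons]
        exact hc

theorem findGo_nl (cs : List Char) : ∀ (k : Nat),
    PySem.Chars.find.go ['\n'] cs k =
      if '\n' ∈ cs then ((k : Int) + ((cs.takeWhile (· ≠ '\n')).length : Int)) else -1 := by
  induction cs with
  | nil => intro k; simp [PySem.Chars.find.go]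
  | cons c t ih =>
    intro k
    rw [PySem.Chars.find.go.eq_def]
    by_cases hc : c = '\n'
    · subst hc
      simp [List.isPrefixOf, List.takeWhile]
    · have hb : (('\n' : Char) == c) = false := by simpa using Ne.symm hc
      simp only [List.isPrefixOf, hb, Bool.false_and, Bool.false_eq_true, if_false]
      rw [ih (k+1)]
      by_cases hm : '\n' ∈ t
      · simp only [hm, if_true, List.mem_cons, or_true, List.takeWhile_cons]
        rw [if_pos (by simp [hc])]
        push_cast [List.length_cons]; ring
      · simp [hm, Ne.symm hc]

theorem loopA_eq (l : List Char) (x y : Int) :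
    l.foldl (fun (p : Int × Int) (c : Char) =>
      if '\n' = c then (1, p.2 + 1) else (p.1 + 1, p.2)) (x, y) =
    ((if '\n' ∈ l then 1 + ((l.reverse.takeWhile (· ≠ '\n')).length : Int)
      else x + (l.length : Int)), y + (l.count '\n' : Int)) := by
  induction l using List.reverseRecOn generalizing x y with
  | nil => simp
  | append_singleton t c ih =>
    rw [List.foldl_append, ih]
    by_cases hc : c = '\n'
    · subst hc
      simp [List.count_append]
      omega
    · have hne : ¬ ('\n' = c) := fun h => hc h.symm
      simp only [List.foldl_cons, List.foldl_nil, if_neg hne]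
      by_cases hm : '\n' ∈ t
      · simp [hm, hc, hne, List.count_append]
        all_goals omega
      · simp [hm, hc, hne, List.count_append]
        all_goals omega

-- ===== VERDICT (by name: the statement is the Claim_ definition above) =====
theorem cursor_motion_spec : Claim_equal_cursor_motion := by
  intro init_x init_y instr _
  unfold Spec_cursor_motion cursor_motion cursor_motion_alt
  rw [loopA_eq]
  have hslice : (PySem.Str.slice? instr none none (-1)).getD "" = String.ofList instr.toList.reverse := by
    have h := PySem.List.slice?_none_none_neg_one (xs := instr.toList)
    simp [PySem.Str.slice?, PySem.Chars.slice?_eq_listSlice?, h]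
  rw [hslice]
  have hfind : PySem.Str.find (String.ofList instr.toList.reverse) "\n" =
      PySem.Chars.find instr.toList.reverse ['\n'] := by
    simp [PySem.Str.find, String.toList_ofList]
  have hcount : (PySem.Str.count instr "\n" : Int) = (instr.toList.count '\n' : Int) := by
    have h2 : PySem.Chars.count instr.toList ['\n'] = instr.toList.count '\n' := by
      unfold PySem.Chars.count
      rw [if_neg (by simp)]
      rw [countGo_nl instr.toList instr.toList.length 0 le_rfl]
      simp
    simp [PySem.Str.count, h2]
  rw [hfind, hcount]
  rw [PySem.Chars.find]
  rw [findGo_nl]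
  by_cases hm : '\n' ∈ instr.toList
  · have hm' : '\n' ∈ instr.toList.reverse := by simp [hm]
    have hne : ((0:Int) + ((instr.toList.reverse.takeWhile (· ≠ '\n')).length : Int)) ≠ -1 := by omega
    simp only [hm, hm', if_pos, Nat.cast_zero]
    rw [if_neg (by simpa using hne)]
    simp
  · have hm' : '\n' ∉ instr.toList.reverse := by simpa using hm
    simp [hm, hm', PySem.Str.len]
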